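-- pv_equiv track=rewrite | github.com/just-russian-amateur/Alchemist-Bot | fucking_game/script_for_test_images.py | sorted_flasks
-- ===== SOURCE A (Python) =====
-- def sorted_flasks(flasks_list):
--     '''Пользовательская функция для сортировки колб в нужном порядке'''
--     min_coord = sorted(
--         flasks_list,
--         key=lambda
--         item:
--         item[0][1]
--     )[1][0][1]
--     layer_height = 500
--     sorted_flask_list, layer_1, layer_2, layer_3 = [], [], [], []
--
--     for coord_flask in flasks_list:
--         number_layer = round((coord_flask[0][1] - min_coord) / layer_height)
--         if number_layer == 0:
--             layer_1.append(coord_flask)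
--         elif number_layer == 1:
--             layer_2.append(coord_flask)
--         elif number_layer == 2:
--             layer_3.append(coord_flask)
--
--     if len(layer_1) != 0:
--         layer_1 = sorted(layer_1)
--     if len(layer_2) != 0:
--         layer_2 = sorted(layer_2)
--     if len(layer_3) != 0:
--         layer_3 = sorted(layer_3)
--
--     for element in layer_1:
--         sorted_flask_list.append(element)
--     for element in layer_2:
--         sorted_flask_list.append(element)
--     for element in layer_3:
--         sorted_flask_list.append(element)
--
--     return sorted_flask_list
-- ===== SOURCE B (Python) =====
-- def sorted_flasks(flasks_list):
--     '''One filter + one composite-key stable sort instead of three buckets and three sorts.'''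
--     min_coord = sorted(flasks_list, key=lambda item: item[0][1])[1][0][1]
--
--     def layer(flask):
--         return round((flask[0][1] - min_coord) / 500)
--
--     return sorted((f for f in flasks_list if layer(f) in (0, 1, 2)),
--                   key=lambda f: (layer(f), f))
-- ===== Notes on version B (the rewrite author's own statement) =====
-- stated objective: simpler
-- what changed: Replaced the three bucket lists, three independent sorts and three concatenation loops with a single filter of flasks whose layer is in {0,1,2} followed by one stable sort on the composite key (layer, flask).
import Mathlib
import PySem

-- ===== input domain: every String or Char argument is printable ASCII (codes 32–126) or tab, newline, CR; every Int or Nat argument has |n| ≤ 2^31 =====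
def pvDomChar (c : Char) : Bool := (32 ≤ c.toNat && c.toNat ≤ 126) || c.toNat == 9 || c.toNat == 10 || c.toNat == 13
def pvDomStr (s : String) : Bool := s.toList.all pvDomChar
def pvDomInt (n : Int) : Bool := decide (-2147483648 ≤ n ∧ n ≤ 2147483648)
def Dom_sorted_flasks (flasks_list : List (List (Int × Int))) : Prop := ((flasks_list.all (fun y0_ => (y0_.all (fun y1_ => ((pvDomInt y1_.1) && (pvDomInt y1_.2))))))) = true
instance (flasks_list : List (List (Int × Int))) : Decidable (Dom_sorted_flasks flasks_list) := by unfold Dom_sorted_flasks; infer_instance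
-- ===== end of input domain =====

-- B replaces A's three bucket lists + three independent sorts + three concatenation
-- loops by one filter and one composite-key stable sort (objective: simpler).

-- ===== shared helpers (both Pythons call the same built-ins on the same values) =====

-- Python's '<' on (int, int) tuples: lexicographic.
def pvPairLt (a b : Int × Int) : Bool := a.1 < b.1 || (a.1 == b.1 && a.2 < b.2)

-- Python's '<' on lists of such tuples: first differing element decides, else shorter first.
-- Ported by hand (exact for this element type): Mathlib's '<' on Int × Int is pointwise, not Python's.
def pvFlaskLt : List (Int × Int) → List (Int × Int) → Bool
  | [], [] => false
  | [], _ :: _ => true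
  | _ :: _, [] => false
  | a :: as, b :: bs => if a = b then pvFlaskLt as bs else pvPairLt a b

-- sorted(xs) on lists of tuples: the same stable insertion sort PySem.List.sorted performs
-- (sorted_eq_foldl_insertBy), with the hand-ported Python comparison.
def pvSortF (xs : List (List (Int × Int))) : List (List (Int × Int)) :=
  xs.foldl (fun acc x => PySem.List.insertBy pvFlaskLt x acc) []

-- round(d / 500) for an integer d: exact round-half-to-even (exact for |d| ≤ 2^32,
-- which Dom_ guarantees; Python's float division is correctly rounded there).
def pvRound500 (d : Int) : Int :=
  let q := PySem.Int.floordiv d 500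
  let r := PySem.Int.mod d 500
  if 250 < r then q + 1 else if r < 250 then q
  else if PySem.Int.mod q 2 = 0 then q else q + 1

-- flask[0][1]  (Pre_ excludes empty flasks, where Python raises IndexError)
def pvKey (f : List (Int × Int)) : Int := (PySem.List.pyGetD f 0 (0, 0)).2

-- round((flask[0][1] - min_coord) / 500)
def pvLayer (m : Int) (f : List (Int × Int)) : Int := pvRound500 (pvKey f - m)

-- sorted(flasks_list, key=lambda item: item[0][1])[1][0][1]
-- (Pre_ excludes lists of length < 2, where the [1] raises IndexError)
def pvMinCoord (flasks_list : List (List (Int × Int))) : Int :=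
  pvKey (PySem.List.pyGetD (PySem.List.sorted flasks_list pvKey) 1 [])

-- ===== PORT A =====
def sorted_flasks (flasks_list : List (List (Int × Int))) : List (List (Int × Int)) :=
  let min_coord := pvMinCoord flasks_list
  let st := flasks_list.foldl
    (fun (acc : List (List (Int × Int)) × List (List (Int × Int)) × List (List (Int × Int))) f =>
      let number_layer := pvLayer min_coord f
      if number_layer = 0 then (acc.1 ++ [f], acc.2.1, acc.2.2)
      else if number_layer = 1 then (acc.1, acc.2.1 ++ [f], acc.2.2)
      else if number_layer = 2 then (acc.1, acc.2.1, acc.2.2 ++ [f])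
      else acc) ([], [], [])
  let layer_1 := if st.1.length ≠ 0 then pvSortF st.1 else st.1
  let layer_2 := if st.2.1.length ≠ 0 then pvSortF st.2.1 else st.2.1
  let layer_3 := if st.2.2.length ≠ 0 then pvSortF st.2.2 else st.2.2
  layer_1 ++ layer_2 ++ layer_3

-- ===== PORT B =====
-- key=lambda f: (layer(f), f) — Python tuple comparison, lexicographic
def pvBeforeC (m : Int) (g h : List (Int × Int)) : Bool :=
  decide (pvLayer m g < pvLayer m h) || (pvLayer m g == pvLayer m h && pvFlaskLt g h)

def sorted_flasks_alt (flasks_list : List (List (Int × Int))) : List (List (Int × Int)) :=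
  let min_coord := pvMinCoord flasks_list
  (flasks_list.filter (fun f =>
      pvLayer min_coord f == 0 || pvLayer min_coord f == 1 || pvLayer min_coord f == 2)).foldl
    (fun acc f => PySem.List.insertBy (pvBeforeC min_coord) f acc) []

-- ===== PRECONDITION & SPEC =====
-- Pre_ excludes exactly the inputs where A raises IndexError: fewer than two flasks
-- (the [1] after the sort) or an empty flask (item[0] in the sort key).
def Pre_sorted_flasks (flasks_list : List (List (Int × Int))) : Prop :=
  2 ≤ flasks_list.length ∧ ∀ f ∈ flasks_list, f ≠ []
instance (flasks_list : List (List (Int × Int))) : Decidable (Pre_sorted_flasks flasks_list) := by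
  unfold Pre_sorted_flasks; infer_instance

def pvWitness_sorted_flasks : (List (List (Int × Int))) := [[(0, 10)], [(1, 260)], [(2, 520)]]

def Spec_sorted_flasks (flasks_list : List (List (Int × Int))) (out : List (List (Int × Int))) : Prop := out = sorted_flasks_alt flasks_list
instance (flasks_list : List (List (Int × Int))) (out : List (List (Int × Int))) : Decidable (Spec_sorted_flasks flasks_list out) := by unfold Spec_sorted_flasks; infer_instance

-- ===== CLAIM (what is proved, stated in full; the proofs are below) =====
def Claim_equal_sorted_flasks : Prop := ∀ (flasks_list : List (List (Int × Int))), Dom_sorted_flasks flasks_list → Pre_sorted_flasks flasks_list → Spec_sorted_flasks flasks_list (sorted_flasks flasks_list)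

-- ===== LEMMAS AND PROOFS =====

-- insertBy skips a prefix on which 'before' is false
lemma insertBy_append_not_before {α : Type} (before : α → α → Bool) (x : α)
    (l1 l2 : List α) (h : ∀ y ∈ l1, before x y = false) :
    PySem.List.insertBy before x (l1 ++ l2) = l1 ++ PySem.List.insertBy before x l2 := by
  induction l1 with
  | nil => rfl
  | cons a t ih =>
      simp only [List.cons_append, PySem.List.insertBy, h a (by simp)]
      simp [ih (fun y hy => h y (by simp [hy]))]

-- insertBy lands inside l1 (under before') when everything in l2 comes strictly after x
lemma insertBy_append_all_before {α : Type} (before before' : α → α → Bool) (x : α)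
    (l1 l2 : List α) (h2 : ∀ y ∈ l2, before x y = true)
    (h1 : ∀ y ∈ l1, before x y = before' x y) :
    PySem.List.insertBy before x (l1 ++ l2) = PySem.List.insertBy before' x l1 ++ l2 := by
  induction l1 with
  | nil =>
      cases l2 with
      | nil => rfl
      | cons b t => simp [PySem.List.insertBy, h2 b (by simp)]
  | cons a t ih =>
      by_cases hb : before' x a = true
      · simp [PySem.List.insertBy, (h1 a (by simp)).trans hb, hb]
      · have hb' : before x a = false := by
          rw [h1 a (by simp)]; simpa using hb
        simp only [List.cons_append, PySem.List.insertBy, hb', Bool.false_eq_true, if_false]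
        simp [hb, ih (fun y hy => h1 y (by simp [hy]))]

lemma beforeC_of_lt (m : Int) (x y : List (Int × Int)) (h : pvLayer m x < pvLayer m y) :
    pvBeforeC m x y = true := by simp [pvBeforeC, h]

lemma beforeC_of_gt (m : Int) (x y : List (Int × Int)) (h : pvLayer m y < pvLayer m x) :
    pvBeforeC m x y = false := by
  simp [pvBeforeC, not_lt_of_gt h, Int.ne_of_gt h]

lemma beforeC_of_eq (m : Int) (x y : List (Int × Int)) (h : pvLayer m x = pvLayer m y) :
    pvBeforeC m x y = pvFlaskLt x y := by simp [pvBeforeC, h]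

-- one composite-key insertion = an insertion into the right bucket
lemma insertC_split (m : Int) (x : List (Int × Int)) (a0 a1 a2 : List (List (Int × Int)))
    (h0 : ∀ y ∈ a0, pvLayer m y = 0) (h1 : ∀ y ∈ a1, pvLayer m y = 1)
    (h2 : ∀ y ∈ a2, pvLayer m y = 2) :
    PySem.List.insertBy (pvBeforeC m) x (a0 ++ a1 ++ a2) =
      if pvLayer m x = 0 then PySem.List.insertBy pvFlaskLt x a0 ++ a1 ++ a2
      else if pvLayer m x = 1 then a0 ++ PySem.List.insertBy pvFlaskLt x a1 ++ a2
      else if pvLayer m x = 2 then a0 ++ a1 ++ PySem.List.insertBy pvFlaskLt x a2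
      else PySem.List.insertBy (pvBeforeC m) x (a0 ++ a1 ++ a2) := by
  split_ifs with hx0 hx1 hx2
  · rw [List.append_assoc, insertBy_append_all_before (pvBeforeC m) pvFlaskLt x a0 (a1 ++ a2)
      (fun y hy => by
        rcases List.mem_append.1 hy with hy | hy
        · exact beforeC_of_lt m x y (by rw [hx0, h1 y hy]; decide)
        · exact beforeC_of_lt m x y (by rw [hx0, h2 y hy]; decide))
      (fun y hy => beforeC_of_eq m x y (by rw [hx0, h0 y hy]))]
    simp
  · rw [List.append_assoc, insertBy_append_not_before (pvBeforeC m) x a0 (a1 ++ a2)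
      (fun y hy => beforeC_of_gt m x y (by rw [hx1, h0 y hy]; decide)),
      insertBy_append_all_before (pvBeforeC m) pvFlaskLt x a1 a2
      (fun y hy => beforeC_of_lt m x y (by rw [hx1, h2 y hy]; decide))
      (fun y hy => beforeC_of_eq m x y (by rw [hx1, h1 y hy]))]
    simp
  · have ha2 : PySem.List.insertBy (pvBeforeC m) x a2 =
        PySem.List.insertBy pvFlaskLt x a2 ++ [] := by
      rw [← List.append_nil a2, insertBy_append_all_before (pvBeforeC m) pvFlaskLt x a2 []
        (by simp) (fun y hy => beforeC_of_eq m x y (by rw [hx2, h2 y hy]))]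
      simp
    rw [List.append_assoc, insertBy_append_not_before (pvBeforeC m) x a0 (a1 ++ a2)
      (fun y hy => beforeC_of_gt m x y (by rw [hx2, h0 y hy]; decide)),
      insertBy_append_not_before (pvBeforeC m) x a1 a2
      (fun y hy => beforeC_of_gt m x y (by rw [hx2, h1 y hy]; decide)), ha2]
    simp
  · rfl

-- the composite-key sort of the filtered list = the three bucket sorts, concatenated
lemma sortC_split (m : Int) : ∀ (xs a0 a1 a2 : List (List (Int × Int))),
    (∀ y ∈ a0, pvLayer m y = 0) → (∀ y ∈ a1, pvLayer m y = 1) → (∀ y ∈ a2, pvLayer m y = 2) →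
    (xs.filter (fun f => pvLayer m f == 0 || pvLayer m f == 1 || pvLayer m f == 2)).foldl
        (fun acc f => PySem.List.insertBy (pvBeforeC m) f acc) (a0 ++ a1 ++ a2)
    = (xs.filter (fun f => pvLayer m f == 0)).foldl
        (fun acc f => PySem.List.insertBy pvFlaskLt f acc) a0
      ++ (xs.filter (fun f => pvLayer m f == 1)).foldl
        (fun acc f => PySem.List.insertBy pvFlaskLt f acc) a1
      ++ (xs.filter (fun f => pvLayer m f == 2)).foldl
        (fun acc f => PySem.List.insertBy pvFlaskLt f acc) a2
  | [], a0, a1, a2, _, _, _ => by simp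
  | x :: xs, a0, a1, a2, h0, h1, h2 => by
    by_cases hx0 : pvLayer m x = 0
    · simp only [List.filter_cons, hx0, beq_self_eq_true, Bool.true_or, if_pos, List.foldl_cons,
        show ((0 : Int) == 1) = false by decide, show ((0 : Int) == 2) = false by decide,
        Bool.false_eq_true, if_false]
      rw [insertC_split m x a0 a1 a2 h0 h1 h2, if_pos hx0]
      exact sortC_split m xs _ a1 a2
        (fun y hy => by
          rcases (PySem.List.mem_insertBy pvFlaskLt x y a0).1 hy with rfl | hy
          · exact hx0
          · exact h0 y hy) h1 h2
    · by_cases hx1 : pvLayer m x = 1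
      · simp only [List.filter_cons, hx1, beq_self_eq_true, Bool.or_true, Bool.true_or,
          List.foldl_cons, show ((1 : Int) == 0) = false by decide,
          show ((1 : Int) == 2) = false by decide, Bool.false_eq_true, if_true, if_false]
        rw [insertC_split m x a0 a1 a2 h0 h1 h2, if_neg hx0, if_pos hx1]
        exact sortC_split m xs a0 _ a2 h0
          (fun y hy => by
            rcases (PySem.List.mem_insertBy pvFlaskLt x y a1).1 hy with rfl | hy
            · exact hx1
            · exact h1 y hy) h2
      · by_cases hx2 : pvLayer m x = 2
        · simp only [List.filter_cons, hx2, beq_self_eq_true, Bool.or_true, List.foldl_cons,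
            show ((2 : Int) == 0) = false by decide, show ((2 : Int) == 1) = false by decide,
            Bool.false_eq_true, if_true, if_false]
          rw [insertC_split m x a0 a1 a2 h0 h1 h2, if_neg hx0, if_neg hx1, if_pos hx2]
          exact sortC_split m xs a0 a1 _ h0 h1
            (fun y hy => by
              rcases (PySem.List.mem_insertBy pvFlaskLt x y a2).1 hy with rfl | hy
              · exact hx2
              · exact h2 y hy)
        · simp only [List.filter_cons,
            show (pvLayer m x == 0) = false by simpa using hx0,
            show (pvLayer m x == 1) = false by simpa using hx1,
            show (pvLayer m x == 2) = false by simpa using hx2,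
            Bool.or_false, Bool.false_eq_true, if_false]
          exact sortC_split m xs a0 a1 a2 h0 h1 h2

-- A's bucketing loop computes the three filters
lemma buckets (m : Int) : ∀ (xs : List (List (Int × Int)))
    (l1 l2 l3 : List (List (Int × Int))),
    xs.foldl (fun (acc : List (List (Int × Int)) × List (List (Int × Int)) × List (List (Int × Int))) f =>
      let number_layer := pvLayer m f
      if number_layer = 0 then (acc.1 ++ [f], acc.2.1, acc.2.2)
      else if number_layer = 1 then (acc.1, acc.2.1 ++ [f], acc.2.2)
      else if number_layer = 2 then (acc.1, acc.2.1, acc.2.2 ++ [f])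
      else acc) (l1, l2, l3)
    = (l1 ++ xs.filter (fun f => pvLayer m f == 0),
       l2 ++ xs.filter (fun f => pvLayer m f == 1),
       l3 ++ xs.filter (fun f => pvLayer m f == 2))
  | [], l1, l2, l3 => by simp
  | x :: xs, l1, l2, l3 => by
    by_cases hx0 : pvLayer m x = 0
    · simp only [List.foldl_cons, List.filter_cons, hx0, if_pos, beq_self_eq_true,
        show ((0 : Int) == 1) = false by decide, show ((0 : Int) == 2) = false by decide,
        Bool.false_eq_true, if_false]
      rw [buckets m xs (l1 ++ [x]) l2 l3]; simp
    · by_cases hx1 : pvLayer m x = 1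
      · simp only [List.foldl_cons, List.filter_cons, hx1, beq_self_eq_true,
          show ((1 : Int) == 0) = false by decide, show ((1 : Int) == 2) = false by decide,
          Bool.false_eq_true, if_true, if_false]
        norm_num
        rw [buckets m xs l1 (l2 ++ [x]) l3]; simp
      · by_cases hx2 : pvLayer m x = 2
        · simp only [List.foldl_cons, List.filter_cons, hx2, beq_self_eq_true,
            show ((2 : Int) == 0) = false by decide, show ((2 : Int) == 1) = false by decide,
            Bool.false_eq_true, if_true, if_false]
          norm_num
          rw [buckets m xs l1 l2 (l3 ++ [x])]; simp
        · simp only [List.foldl_cons, List.filter_cons,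
            show (pvLayer m x == 0) = false by simpa using hx0,
            show (pvLayer m x == 1) = false by simpa using hx1,
            show (pvLayer m x == 2) = false by simpa using hx2,
            Bool.false_eq_true, if_false, if_neg hx0, if_neg hx1, if_neg hx2]
          exact buckets m xs l1 l2 l3

-- A's emptiness guard around sorted() is a no-op
lemma guard_sort (l : List (List (Int × Int))) :
    (if l.length ≠ 0 then pvSortF l else l) = pvSortF l := by
  cases l <;> simp [pvSortF]

-- ===== VERDICT (by name: the statement is the Claim_ definition above) =====
theorem sorted_flasks_spec : Claim_equal_sorted_flasks := by
  intro fl _ _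
  show sorted_flasks fl = sorted_flasks_alt fl
  simp only [sorted_flasks, sorted_flasks_alt]
  rw [buckets (pvMinCoord fl) fl [] [] []]
  simp only [List.nil_append, guard_sort]
  rw [show ([] : List (List (Int × Int))) = [] ++ [] ++ [] by simp] at *
  rw [sortC_split (pvMinCoord fl) fl [] [] [] (by simp) (by simp) (by simp)]
  rfl
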